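-- pv_equiv track=rewrite | github.com/Dlairay/I-hate-insurance-agents | questionnaire/server.py | is_mvp_questionnaire
-- ===== SOURCE A (Python) =====
-- from typing import Dict, List, Any, Optional
--
-- def is_mvp_questionnaire(responses: Dict[str, Any]) -> bool:
--     """Detect if this is the simplified 8-question MVP questionnaire"""
--     mvp_question_ids = {
--         "basic_info", "existing_coverage", "current_coverage_amount",
--         "health_status", "primary_need", "budget", "coverage_priority", "timeline"
--     }
--
--     # Check if we have MVP questions and don't have legacy questions
--     has_mvp_questions = any(qid in responses for qid in mvp_question_ids)
--     has_legacy_questions = any(qid.startswith("personal_") for qid in responses.keys())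
--
--     return has_mvp_questions and not has_legacy_questions
-- ===== SOURCE B (Python) =====
-- MVP_QUESTION_IDS = {
--     "basic_info", "existing_coverage", "current_coverage_amount",
--     "health_status", "primary_need", "budget", "coverage_priority", "timeline"
-- }
--
-- def is_mvp_questionnaire(responses):
--     """Detect if this is the simplified 8-question MVP questionnaire.
--
--     Two-phase early-exit scan over a single iterator: phase 1 searches for
--     the first MVP key, aborting as soon as a legacy ('personal_') key
--     appears; once an MVP key is found, phase 2 only verifies that no legacy
--     key follows."""
--     keys = iter(responses)
--     for k in keys:                       # phase 1: look for an MVP key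
--         if k.startswith("personal_"):
--             return False
--         if k in MVP_QUESTION_IDS:
--             for rest in keys:            # phase 2: remaining keys legacy-free?
--                 if rest.startswith("personal_"):
--                     return False
--             return True
--     return False
-- ===== Notes on version B (the rewrite author's own statement) =====
-- stated objective: alternative
-- what changed: B replaces A's two independent full scans (any over the 8 MVP ids probing the dict, plus any over all keys for the legacy prefix) with a two-phase early-exit scan over a single key iterator: phase 1 looks for the first MVP key and aborts immediately on a legacy key; phase 2 then only checks the remaining keys for the legacy prefix.
import Mathlib
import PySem

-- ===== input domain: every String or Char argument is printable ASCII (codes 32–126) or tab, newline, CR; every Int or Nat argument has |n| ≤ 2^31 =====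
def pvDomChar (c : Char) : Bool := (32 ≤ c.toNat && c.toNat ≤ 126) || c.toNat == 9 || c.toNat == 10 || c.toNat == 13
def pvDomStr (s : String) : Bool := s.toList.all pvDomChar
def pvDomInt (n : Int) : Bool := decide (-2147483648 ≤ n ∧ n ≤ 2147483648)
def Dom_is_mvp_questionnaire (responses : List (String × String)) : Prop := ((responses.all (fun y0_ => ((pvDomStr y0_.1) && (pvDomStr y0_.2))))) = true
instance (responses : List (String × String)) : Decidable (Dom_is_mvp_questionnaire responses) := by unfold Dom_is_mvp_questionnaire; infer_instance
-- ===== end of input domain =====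

-- B replaces A's two independent full scans with a recursive two-phase early-exit scan (alternative decomposition, same cost).
-- ===== PORT A =====
def mvpQuestionIdsA : PySem.Set String := PySem.Set.ofList
  ["basic_info", "existing_coverage", "current_coverage_amount",
   "health_status", "primary_need", "budget", "coverage_priority", "timeline"]

def is_mvp_questionnaire (responses : List (String × String)) : Bool :=
  let has_mvp_questions := mvpQuestionIdsA.any (fun qid => responses.any (fun kv => kv.1 == qid))
  let has_legacy_questions := responses.any (fun kv => PySem.Str.startswith kv.1 "personal_")
  has_mvp_questions && !has_legacy_questions

-- ===== PORT B =====
def mvpQuestionIdsB : PySem.Set String := PySem.Set.ofList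
  ["basic_info", "existing_coverage", "current_coverage_amount",
   "health_status", "primary_need", "budget", "coverage_priority", "timeline"]

-- phase 2 of Source B's scan: no remaining key has the legacy prefix
def altNoLegacy : List String → Bool
  | [] => true
  | k :: tl => if PySem.Str.startswith k "personal_" then false else altNoLegacy tl

-- phase 1 of Source B's scan: find the first MVP key, aborting on a legacy key
def altScan : List String → Bool
  | [] => false
  | k :: tl =>
    if PySem.Str.startswith k "personal_" then false
    else if mvpQuestionIdsB.contains k then altNoLegacy tl
    else altScan tl

def is_mvp_questionnaire_alt (responses : List (String × String)) : Bool :=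
  altScan (responses.map Prod.fst)

-- ===== PRECONDITION & SPEC =====
def Spec_is_mvp_questionnaire (responses : List (String × String)) (out : Bool) : Prop := out = is_mvp_questionnaire_alt responses
instance (responses : List (String × String)) (out : Bool) : Decidable (Spec_is_mvp_questionnaire responses out) := by unfold Spec_is_mvp_questionnaire; infer_instance

-- ===== CLAIM (what is proved, stated in full; the proofs are below) =====
def Claim_equal_is_mvp_questionnaire : Prop := ∀ (responses : List (String × String)), Dom_is_mvp_questionnaire responses → Spec_is_mvp_questionnaire responses (is_mvp_questionnaire responses)

-- ===== LEMMAS AND PROOFS =====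
theorem altNoLegacy_eq (l : List String) :
    altNoLegacy l = !(l.any (fun k => PySem.Str.startswith k "personal_")) := by
  induction l with
  | nil => simp [altNoLegacy]
  | cons k tl ih =>
    simp only [altNoLegacy, List.any_cons]
    cases hc : PySem.Str.startswith k "personal_" <;> simp [hc, ih]

theorem altScan_eq (l : List String) :
    altScan l = ((l.any (fun k => mvpQuestionIdsB.contains k))
      && !(l.any (fun k => PySem.Str.startswith k "personal_"))) := by
  induction l with
  | nil => simp [altScan]
  | cons k tl ih =>
    simp only [altScan, List.any_cons]
    cases hc : PySem.Str.startswith k "personal_" <;>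
      cases hm : mvpQuestionIdsB.contains k <;>
        simp [hc, hm, altNoLegacy_eq, ih]

theorem any_swap (responses : List (String × String)) :
    mvpQuestionIdsA.any (fun qid => responses.any (fun kv => kv.1 == qid))
    = (responses.map Prod.fst).any (fun k => mvpQuestionIdsB.contains k) := by
  rw [Bool.eq_iff_iff]
  simp only [PySem.Set.contains_eq_listContains, List.contains_eq_any_beq, List.any_map,
    List.any_eq_true, Function.comp]
  constructor
  · rintro ⟨q, hq, kv, hkv, he⟩
    exact ⟨kv, hkv, q, hq, he⟩
  · rintro ⟨kv, hkv, q, hq, he⟩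
    exact ⟨q, hq, kv, hkv, he⟩

-- ===== VERDICT (by name: the statement is the Claim_ definition above) =====
theorem is_mvp_questionnaire_spec : Claim_equal_is_mvp_questionnaire := by
  intro responses _
  unfold Spec_is_mvp_questionnaire is_mvp_questionnaire is_mvp_questionnaire_alt
  rw [altScan_eq, any_swap]
  simp [List.any_map, Function.comp]
  rfl
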